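-- pv_equiv track=rewrite | github.com/JeremyBOUCHEPILLON/legalDataProcessing | code/chaine_full_test_v1.py | brackets_contents
-- ===== SOURCE A (Python) =====
-- def brackets_contents(string):
--     """Generate bracketed contents in string as pairs (level, contents)."""
--     stack = []
--     for i, c in enumerate(string):
--         if c == '{':
--             stack.append(i)
--         elif c == '}' and stack:
--             start = stack.pop()
--             yield (len(stack), string[start + 1: i])
-- ===== SOURCE B (Python) =====
-- def brackets_contents(string):
--     """Generate bracketed contents in string as pairs (level, contents).
--
--     Recursive-descent parser: parse(i, depth) scans from index i inside a
--     group; on '{' it recurses, and when the matching '}' is found the pair is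
--     yielded after the recursion, so inner pairs come first (post-order),
--     exactly the closing order of the braces.
--     """
--     def parse(i, depth):
--         n = len(string)
--         while i < n:
--             c = string[i]
--             if c == '{':
--                 j = yield from parse(i + 1, depth + 1)
--                 if j is None:          # inner group never closed: end of input
--                     return None
--                 yield (depth, string[i + 1:j])
--                 i = j + 1
--             elif c == '}' and depth > 0:
--                 return i               # index of this group's closing brace
--             else:
--                 i += 1
--         return None
--
--     return (yield from parse(0, 0))
-- ===== Notes on version B (the rewrite author's own statement) =====
-- stated objective: alternative
-- what changed: Replaces A's single loop over enumerate with an explicit stack of open-brace indices by a recursive-descent parser parse(i, depth) that recurses at each opening brace and emits each pair after its recursive call (post-order), reproducing A's closing-order output.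
import Mathlib
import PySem

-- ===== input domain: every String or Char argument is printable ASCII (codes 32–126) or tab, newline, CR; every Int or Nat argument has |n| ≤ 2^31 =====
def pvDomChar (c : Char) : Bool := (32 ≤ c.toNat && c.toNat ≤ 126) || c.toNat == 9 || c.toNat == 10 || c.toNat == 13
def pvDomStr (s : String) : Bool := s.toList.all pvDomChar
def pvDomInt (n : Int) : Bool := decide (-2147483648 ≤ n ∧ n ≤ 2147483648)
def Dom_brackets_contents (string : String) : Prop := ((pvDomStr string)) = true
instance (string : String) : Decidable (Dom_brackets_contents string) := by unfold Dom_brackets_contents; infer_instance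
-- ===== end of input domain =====

-- B replaces A's explicit index stack by a recursive-descent parser emitting pairs post-order;
-- same return values (A is a generator: equivalence is about the list of yielded pairs); objective: alternative.

-- ===== PORT A =====
-- loop body of A: stack (top at head) of open-brace indices, out = yielded pairs so far
def stepA (string : String) (st : List Int × List (Int × String)) (ic : Int × Char) :
    List Int × List (Int × String) :=
  if ic.2 = '{' then (ic.1 :: st.1, st.2)
  else
    match st.1 with
    | start :: rest =>
        if ic.2 = '}' then
          (rest, st.2 ++ [((rest.length : Int),
                           PySem.Str.slice string (some (start + 1)) (some ic.1))])
        else st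
    | [] => st   -- the pop branch needs a nonempty stack

def brackets_contents (string : String) : List (Int × String) :=
  ((PySem.List.enumerate string.toList 0).foldl (stepA string) ([], [])).2

-- ===== PORT B =====
-- parse(i, depth) of Source B: scans from index i; returns (pairs yielded, index of the
-- group's closing brace if reached).  The subtype invariant (i ≤ j, 0 < depth) is only
-- for termination / top-level reasoning; the computation is Source B's, step for step.
def parseB (string : String) (i depth : Nat) :
    { r : List (Int × String) × Option Nat // ∀ j, r.2 = some j → i ≤ j ∧ 0 < depth } :=
  if h : i < string.toList.length then
    if hc : string.toList[i] = '{' then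
      let inner := parseB string (i + 1) (depth + 1)
      match hj : inner.val.2 with
      | none => ⟨(inner.val.1, none), by simp⟩
      | some j =>
        have hij : i + 1 ≤ j := (inner.property j hj).1
        let rest := parseB string (j + 1) depth
        ⟨((inner.val.1 ++ [((depth : Int),
              PySem.Str.slice string (some ((i : Int) + 1)) (some (j : Int)))]) ++ rest.val.1,
          rest.val.2),
         fun k hk => ⟨by have := (rest.property k hk).1; omega, (rest.property k hk).2⟩⟩
    else if hd : string.toList[i] = '}' ∧ 0 < depth then
      ⟨([], some i), fun j hj => by simp only [Option.some.injEq] at hj; omega⟩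
    else
      let r := parseB string (i + 1) depth
      ⟨r.val, fun j hj => ⟨by have := (r.property j hj).1; omega, (r.property j hj).2⟩⟩
  else ⟨([], none), by simp⟩
termination_by string.toList.length - i
decreasing_by all_goals omega

def brackets_contents_alt (string : String) : List (Int × String) :=
  (parseB string 0 0).val.1

-- ===== PRECONDITION & SPEC =====
def Spec_brackets_contents (string : String) (out : List (Int × String)) : Prop := out = brackets_contents_alt string
instance (string : String) (out : List (Int × String)) : Decidable (Spec_brackets_contents string out) := by unfold Spec_brackets_contents; infer_instance

-- ===== CLAIM (what is proved, stated in full; the proofs are below) =====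
def Claim_equal_brackets_contents : Prop := ∀ (string : String), Dom_brackets_contents string → Spec_brackets_contents string (brackets_contents string)

-- ===== LEMMAS AND PROOFS =====

lemma enum_drop_step (cs : List Char) (i : Nat) (h : i < cs.length) :
    PySem.List.enumerate (cs.drop i) (i : Int)
      = ((i : Int), cs[i]) :: PySem.List.enumerate (cs.drop (i + 1)) (((i + 1 : Nat)) : Int) := by
  rw [List.drop_eq_getElem_cons h, PySem.List.enumerate_cons]
  push_cast
  rfl

lemma main_invariant (string : String) :
    ∀ (n i depth : Nat) (stack : List Int) (out : List (Int × String)),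
      string.toList.length - i ≤ n → depth = stack.length →
      ((parseB string i depth).val.2 = none →
        ((PySem.List.enumerate (string.toList.drop i) (i : Int)).foldl (stepA string) (stack, out)).2
          = out ++ (parseB string i depth).val.1) ∧
      (∀ (j : Nat) (start : Int) (stack' : List Int),
        (parseB string i depth).val.2 = some j → stack = start :: stack' →
        (PySem.List.enumerate (string.toList.drop i) (i : Int)).foldl (stepA string) (stack, out)
          = (PySem.List.enumerate (string.toList.drop (j + 1)) ((j : Int) + 1)).foldl (stepA string)
              (stack', out ++ (parseB string i depth).val.1
                 ++ [((stack'.length : Int),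
                      PySem.Str.slice string (some (start + 1)) (some (j : Int)))])) := by
  intro n
  induction n with
  | zero =>
      intro i depth stack out hn hd
      have hge : string.toList.length ≤ i := by omega
      rw [parseB.eq_def]
      simp only [dif_neg (by omega : ¬ i < string.toList.length)]
      refine ⟨fun _ => ?_, fun j start stack' hsome hstack => by simp at hsome⟩
      simp [List.drop_eq_nil_of_le hge, PySem.List.enumerate_nil]
  | succ n ih =>
      intro i depth stack out hn hd
      by_cases h : i < string.toList.length
      · rw [enum_drop_step _ i h, List.foldl_cons]
        by_cases hc : string.toList[i] = '{'
        · have hstep : stepA string (stack, out) ((i : Int), string.toList[i])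
              = ((i : Int) :: stack, out) := by simp [stepA, hc]
          rw [hstep, parseB.eq_def]
          simp only [dif_pos h, dif_pos hc]
          split
          · rename_i heq
            dsimp only
            have IH := ih (i + 1) (depth + 1) ((i : Int) :: stack) out (by omega) (by simp [hd])
            refine ⟨fun _ => IH.1 heq, fun j start stack' hsome hstack => by simp at hsome⟩
          · rename_i j0 heq
            dsimp only
            have hij : i + 1 ≤ j0 := ((parseB string (i + 1) (depth + 1)).property j0 heq).1
            have IH1 := ih (i + 1) (depth + 1) ((i : Int) :: stack) out (by omega) (by simp [hd])
            have step1 := IH1.2 j0 (i : Int) stack heq rfl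
            have hcast : ((j0 : Int) + 1) = (((j0 + 1 : Nat)) : Int) := by push_cast; ring
            rw [hcast] at step1
            constructor
            · intro hrnone
              have IH2 := ih (j0 + 1) depth stack
                (out ++ (parseB string (i + 1) (depth + 1)).val.1
                   ++ [((stack.length : Int), PySem.Str.slice string (some ((i : Int) + 1)) (some (j0 : Int)))])
                (by omega) hd
              rw [step1, IH2.1 hrnone]
              simp [hd, List.append_assoc]
            · intro j start stack' hsome hstack
              subst hstack
              have IH2 := ih (j0 + 1) depth (start :: stack')
                (out ++ (parseB string (i + 1) (depth + 1)).val.1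
                   ++ [(((start :: stack').length : Int), PySem.Str.slice string (some ((i : Int) + 1)) (some (j0 : Int)))])
                (by omega) hd
              rw [step1, IH2.2 j start stack' hsome rfl]
              simp [hd, List.append_assoc]
        · by_cases hd2 : string.toList[i] = '}' ∧ 0 < depth
          · rw [parseB.eq_def]
            simp only [dif_pos h, dif_neg hc, dif_pos hd2]
            refine ⟨fun hnone => by simp at hnone, fun j start stack' hsome hstack => ?_⟩
            simp only [Option.some.injEq] at hsome
            subst hsome hstack
            have hstep : stepA string (start :: stack', out) ((i : Int), string.toList[i])
                = (stack', out ++ [((stack'.length : Int),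
                    PySem.Str.slice string (some (start + 1)) (some (i : Int)))]) := by
              simp [stepA, hd2.1]
            rw [hstep]
            push_cast
            simp
          · have hstep : stepA string (stack, out) ((i : Int), string.toList[i])
                = (stack, out) := by
              rcases stack with _ | ⟨start, rest⟩
              · simp [stepA, hc]
              · have hne : ¬ string.toList[i] = '}' := fun he => hd2 ⟨he, by rw [hd]; simp⟩
                simp [stepA, hc, hne]
            rw [hstep, parseB.eq_def]
            simp only [dif_pos h, dif_neg hc, dif_neg hd2]
            have hb : string.toList.length - (i + 1) ≤ n := by omega
            exact ih (i + 1) depth stack out hb hd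
      · have hge : string.toList.length ≤ i := by omega
        rw [parseB.eq_def]
        simp only [dif_neg h]
        refine ⟨fun _ => ?_, fun j start stack' hsome hstack => by simp at hsome⟩
        simp [List.drop_eq_nil_of_le hge, PySem.List.enumerate_nil]


-- ===== VERDICT (by name: the statement is the Claim_ definition above) =====
theorem brackets_contents_spec : Claim_equal_brackets_contents := by
  intro string _
  unfold Spec_brackets_contents brackets_contents brackets_contents_alt
  have h := main_invariant string string.toList.length 0 0 [] [] (by omega) rfl
  cases hj : (parseB string 0 0).val.2 with
  | none =>
      have := h.1 hj
      simpa using this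
  | some j =>
      exact absurd ((parseB string 0 0).property j hj).2 (by omega)
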